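-- pv_equiv track=rewrite | github.com/chungoid/chungoid | src/chungoid/intelligence/advanced_replanning_intelligence.py | _determine_prerequisites
-- ===== SOURCE A (Python) =====
-- from typing import Dict, List, Any, Optional, Set, Tuple, Union
--
-- def _determine_prerequisites(
--
--     steps: List[Dict[str, Any]],
--     project_context: Optional[Dict[str, Any]]
-- ) -> List[str]:
--     """Determine prerequisites for executing the recovery strategy."""
--     prerequisites = []
--
--     # Check for common prerequisites based on step types
--     step_actions = [step.get('action', '').lower() for step in steps]
--
--     if any('install' in action for action in step_actions):
--         prerequisites.append("Package manager available (pip, npm, etc.)")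
--
--     if any('git' in action for action in step_actions):
--         prerequisites.append("Git repository initialized")
--
--     if any('test' in action for action in step_actions):
--         prerequisites.append("Testing framework configured")
--
--     # Add project-specific prerequisites
--     if project_context:
--         project_type = project_context.get('project_type', '')
--         if project_type == 'python':
--             prerequisites.append("Python environment activated")
--         elif project_type == 'javascript':
--             prerequisites.append("Node.js environment available")
--
--     return list(set(prerequisites))  # Remove duplicates
-- ===== SOURCE B (Python) =====
-- def _determine_prerequisites(steps, project_context):
--     # Single pass over steps with early exit once all three flags are set,
--     # instead of three separate any(...) scans over a prebuilt action list.
--     has_install = has_git = has_test = False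
--     for step in steps:
--         if has_install and has_git and has_test:
--             break
--         action = step.get('action', '').lower()
--         has_install = has_install or 'install' in action
--         has_git = has_git or 'git' in action
--         has_test = has_test or 'test' in action
--
--     prerequisites = []
--     if has_install:
--         prerequisites.append("Package manager available (pip, npm, etc.)")
--     if has_git:
--         prerequisites.append("Git repository initialized")
--     if has_test:
--         prerequisites.append("Testing framework configured")
--
--     if project_context:
--         project_type = project_context.get('project_type', '')
--         if project_type == 'python':
--             prerequisites.append("Python environment activated")
--         elif project_type == 'javascript':
--             prerequisites.append("Node.js environment available")
--
--     return list(set(prerequisites))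
-- ===== Notes on version B (the rewrite author's own statement) =====
-- stated objective: alternative
-- what changed: B replaces A's action-list comprehension plus three separate any(...) scans by one pass over steps that lowercases each action once and sets three booleans, breaking out early once all three are set; the project_type branch and the final set-dedup are unchanged.
import Mathlib
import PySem

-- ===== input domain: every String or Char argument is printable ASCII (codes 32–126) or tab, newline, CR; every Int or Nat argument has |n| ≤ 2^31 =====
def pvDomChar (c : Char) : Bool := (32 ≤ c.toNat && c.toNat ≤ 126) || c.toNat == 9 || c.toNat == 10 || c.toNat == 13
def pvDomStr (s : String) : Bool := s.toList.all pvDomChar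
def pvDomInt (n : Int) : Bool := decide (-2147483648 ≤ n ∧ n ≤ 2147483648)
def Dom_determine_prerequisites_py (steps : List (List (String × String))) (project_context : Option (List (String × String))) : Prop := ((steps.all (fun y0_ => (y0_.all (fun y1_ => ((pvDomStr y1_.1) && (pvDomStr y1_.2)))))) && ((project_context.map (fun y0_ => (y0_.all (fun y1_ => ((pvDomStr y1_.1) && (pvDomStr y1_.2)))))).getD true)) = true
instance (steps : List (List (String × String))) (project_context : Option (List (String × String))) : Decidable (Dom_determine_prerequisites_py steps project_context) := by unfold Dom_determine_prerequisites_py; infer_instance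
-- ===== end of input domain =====

-- B does one pass over steps setting three booleans with an early break, instead of
-- three any(...) scans over a prebuilt lowercased action list (alternative decomposition).


-- ===== PORT A =====
-- literal port of A: build step_actions, three any(...) scans, project branch, list(set(...))
def determine_prerequisites_py (steps : List (List (String × String))) (project_context : Option (List (String × String))) : List String :=
  let step_actions := steps.map (fun step => PySem.Str.lower ((PySem.Dict.ofList step).getD "action" ""))
  let prerequisites : List String := []
  let prerequisites := if step_actions.any (fun action => PySem.Str.isIn "install" action)
    then prerequisites ++ ["Package manager available (pip, npm, etc.)"] else prerequisites
  let prerequisites := if step_actions.any (fun action => PySem.Str.isIn "git" action)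
    then prerequisites ++ ["Git repository initialized"] else prerequisites
  let prerequisites := if step_actions.any (fun action => PySem.Str.isIn "test" action)
    then prerequisites ++ ["Testing framework configured"] else prerequisites
  let prerequisites :=
    match project_context with
    | none => prerequisites
    | some ctx =>
      if ctx = [] then prerequisites  -- 'if project_context:' — an empty dict is falsy
      else
        let project_type := (PySem.Dict.ofList ctx).getD "project_type" ""
        if project_type = "python" then prerequisites ++ ["Python environment activated"]
        else if project_type = "javascript" then prerequisites ++ ["Node.js environment available"]
        else prerequisites
  PySem.Set.ofList prerequisites  -- list(set(prerequisites)); output is compared as a set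

-- ===== PORT B =====
-- B's loop: one pass over steps, early break once all three flags are set
def dp_scanFlags (steps : List (List (String × String))) (hi hg ht : Bool) : Bool × Bool × Bool :=
  match steps with
  | [] => (hi, hg, ht)
  | step :: rest =>
    if hi && hg && ht then (hi, hg, ht)
    else
      let action := PySem.Str.lower ((PySem.Dict.ofList step).getD "action" "")
      dp_scanFlags rest (hi || PySem.Str.isIn "install" action)
                        (hg || PySem.Str.isIn "git" action)
                        (ht || PySem.Str.isIn "test" action)

def determine_prerequisites_py_alt (steps : List (List (String × String))) (project_context : Option (List (String × String))) : List String :=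
  let flags := dp_scanFlags steps false false false
  let prerequisites : List String :=
    (if flags.1 then ["Package manager available (pip, npm, etc.)"] else []) ++
    (if flags.2.1 then ["Git repository initialized"] else []) ++
    (if flags.2.2 then ["Testing framework configured"] else [])
  let prerequisites :=
    match project_context with
    | none => prerequisites
    | some ctx =>
      if ctx = [] then prerequisites
      else
        let project_type := (PySem.Dict.ofList ctx).getD "project_type" ""
        if project_type = "python" then prerequisites ++ ["Python environment activated"]
        else if project_type = "javascript" then prerequisites ++ ["Node.js environment available"]
        else prerequisites
  PySem.Set.ofList prerequisites

-- ===== PRECONDITION & SPEC =====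
def Spec_determine_prerequisites_py (steps : List (List (String × String))) (project_context : Option (List (String × String))) (out : List String) : Prop := out = determine_prerequisites_py_alt steps project_context
instance (steps : List (List (String × String))) (project_context : Option (List (String × String))) (out : List String) : Decidable (Spec_determine_prerequisites_py steps project_context out) := by unfold Spec_determine_prerequisites_py; infer_instance

-- ===== CLAIM (what is proved, stated in full; the proofs are below) =====
def Claim_equal_determine_prerequisites_py : Prop := ∀ (steps : List (List (String × String))) (project_context : Option (List (String × String))), Dom_determine_prerequisites_py steps project_context → Spec_determine_prerequisites_py steps project_context (determine_prerequisites_py steps project_context)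

-- ===== LEMMAS AND PROOFS =====

-- the early-exit flag scan computes the three any(...) results
theorem dp_scanFlags_eq (steps : List (List (String × String))) (hi hg ht : Bool) :
    dp_scanFlags steps hi hg ht =
      (hi || steps.any (fun step => PySem.Str.isIn "install" (PySem.Str.lower ((PySem.Dict.ofList step).getD "action" ""))),
       hg || steps.any (fun step => PySem.Str.isIn "git" (PySem.Str.lower ((PySem.Dict.ofList step).getD "action" ""))),
       ht || steps.any (fun step => PySem.Str.isIn "test" (PySem.Str.lower ((PySem.Dict.ofList step).getD "action" "")))) := by
  induction steps generalizing hi hg ht with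
  | nil => simp [dp_scanFlags]
  | cons step rest ih =>
    by_cases h : (hi && hg && ht) = true
    · obtain ⟨⟨h1, h2⟩, h3⟩ := by simpa [Bool.and_eq_true] using h
      simp [dp_scanFlags, h1, h2, h3]
    · simp only [dp_scanFlags, h, if_neg, Bool.false_eq_true, not_false_eq_true, ih]
      simp [Bool.or_assoc]

-- turn A's 'if c then p ++ [x] else p' accumulation into B's concatenation of if-blocks
theorem dp_if_append (c : Bool) (p : List String) (x : String) :
    (if c then p ++ [x] else p) = p ++ (if c then [x] else []) := by
  cases c <;> simp

-- same, after the preceding appends have been right-associated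
theorem dp_if_append' (c : Bool) (p q : List String) (x : String) :
    (if c then p ++ (q ++ [x]) else p ++ q) = p ++ (q ++ (if c then [x] else [])) := by
  cases c <;> simp

theorem determine_prerequisites_py_eq (steps : List (List (String × String))) (project_context : Option (List (String × String))) :
    determine_prerequisites_py steps project_context = determine_prerequisites_py_alt steps project_context := by
  unfold determine_prerequisites_py determine_prerequisites_py_alt
  rw [dp_scanFlags_eq]
  simp only [Bool.false_or, List.any_map, Function.comp_def, dp_if_append, dp_if_append', List.nil_append, List.append_assoc]

-- ===== VERDICT (by name: the statement is the Claim_ definition above) =====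
theorem determine_prerequisites_py_spec : Claim_equal_determine_prerequisites_py := by
  intro steps project_context _
  exact determine_prerequisites_py_eq steps project_context
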